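-- pv_equiv track=rewrite | github.com/Elf-kosar/kriptoloji-sifreleme-cozumleme | kriptoloji_cözum_som3/kriptoloji_cözum/kriptoloji_cözum/algorithms/permutasyon.py | permutasyon_cozme
-- ===== SOURCE A (Python) =====
-- def permutasyon_cozme(sifreli_metin, anahtar_str):
--     """
--     Permütasyon şifrelemesi ile elde edilmiş metni çözer.
--     - sifreli_metin: şifrelenmiş metin (sadece Türk alfabesinden harfler + 'x' dolgu)
--     - anahtar_str: kullanıcıdan alınan "3 1 2" gibi boşluklu permütasyon anahtarı
--     """
--     turk_alfabe = "abcçdefgğhıijklmnoöprsştuüvyz"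
--     alfabe_seti = set(turk_alfabe)
--
--     # 1) Anahtarı parse et
--     try:
--         anahtar = [int(x) for x in anahtar_str.strip().split()]
--     except ValueError:
--         raise ValueError("Anahtar yalnızca sayılardan oluşmalıdır. Örnek: 3 1 2")
--
--     blok_boyu = len(anahtar)
--     # Geçerli aralıkta mı?
--     if any(i < 1 or i > blok_boyu for i in anahtar):
--         raise ValueError(f"Anahtar değerleri 1 ile {blok_boyu} arasında olmalıdır.")
--
--     # 0-based permütasyon indeksi
--     anahtar_idx = [k-1 for k in anahtar]
--
--     # 2) İnvers permütasyonu hesapla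
--     #    anahtar_idx[i] = j  =>  inv_perm[j] = i
--     inv_perm = [0] * blok_boyu
--     for i, j in enumerate(anahtar_idx):
--         inv_perm[j] = i
--
--     # 3) Şifreli metni filtrele (yalnızca alfabe ve 'x')
--     metin = sifreli_metin.lower()
--     temiz = [ch for ch in metin if ch in alfabe_seti or ch == 'x']
--
--     # 4) Blok blok çöz
--     cozulmus = []
--     for i in range(0, len(temiz), blok_boyu):
--         blok = temiz[i:i+blok_boyu]
--         # eksik blok olması pek beklenmez, ama doldurma karakteriyle
--         if len(blok) < blok_boyu:
--             blok += ['x'] * (blok_boyu - len(blok))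
--
--         # her orijinal pozisyona, şifreli bloktaki inv_perm[pos] karakteri gelir
--         orig = [''] * blok_boyu
--         for pos in range(blok_boyu):
--             orig[pos] = blok[inv_perm[pos]]
--         cozulmus.extend(orig)
--
--     # İstersen sondaki dolgu 'x'leri kırpmak mümkün:
--     # while cozulmus and cozulmus[-1] == 'x':
--     #     cozulmus.pop()
--
--     return ''.join(cozulmus)
-- ===== SOURCE B (Python) =====
-- def permutasyon_cozme(sifreli_metin, anahtar_str):
--     """Permutasyon sifresini cozer: her sifreli konumun ACIK metindeki hedef
--     konumunu tek bir anahtar fonksiyonuyla hesaplar ve indeksleri bu hedefe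
--     gore SIRALAYARAK cozer (ters-permutasyon tablosu ve blok dongusu yok)."""
--     turk_alfabe = "abc\u00e7defg\u011fh\u0131ijklmnoöprs\u015ftu\u00fcvyz"
--     alfabe_seti = set(turk_alfabe)
--
--     try:
--         anahtar = [int(x) for x in anahtar_str.strip().split()]
--     except ValueError:
--         raise ValueError("Anahtar yalnızca sayılardan oluşmalıdır. Örnek: 3 1 2")
--
--     blok_boyu = len(anahtar)
--     if any(i < 1 or i > blok_boyu for i in anahtar):
--         raise ValueError(f"Anahtar değerleri 1 ile {blok_boyu} arasında olmalıdır.")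
--
--     temiz = [ch for ch in sifreli_metin.lower() if ch in alfabe_seti or ch == 'x']
--     if temiz and len(temiz) % blok_boyu:
--         temiz += ['x'] * (blok_boyu - len(temiz) % blok_boyu)
--
--     # ciphertext slot i carries the plaintext character whose final position is
--     # (block of i) * blok_boyu + (anahtar[i % blok_boyu] - 1); sorting the slots
--     # by that destination yields the plaintext order directly.
--     def hedef(i):
--         return (i // blok_boyu) * blok_boyu + anahtar[i % blok_boyu] - 1
--
--     sira = sorted(range(len(temiz)), key=hedef)
--     return ''.join(temiz[i] for i in sira)
-- ===== Notes on version B (the rewrite author's own statement) =====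
-- stated objective: alternative
-- what changed: B replaces A's inverse-permutation table and per-block gather loop with a single stable sort: each ciphertext index i is assigned its plaintext destination (i//blok)*blok + anahtar[i%blok] - 1 and the indices are sorted by that key, so the decryption is one sorted() call over the whole (once-padded) text instead of A's table construction plus block-by-block rearrangement.
-- outside the precondition, e.g. on permutasyon_cozme('ab', '1 1'): A returns 'ba', B returns 'ab'
import Mathlib
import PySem

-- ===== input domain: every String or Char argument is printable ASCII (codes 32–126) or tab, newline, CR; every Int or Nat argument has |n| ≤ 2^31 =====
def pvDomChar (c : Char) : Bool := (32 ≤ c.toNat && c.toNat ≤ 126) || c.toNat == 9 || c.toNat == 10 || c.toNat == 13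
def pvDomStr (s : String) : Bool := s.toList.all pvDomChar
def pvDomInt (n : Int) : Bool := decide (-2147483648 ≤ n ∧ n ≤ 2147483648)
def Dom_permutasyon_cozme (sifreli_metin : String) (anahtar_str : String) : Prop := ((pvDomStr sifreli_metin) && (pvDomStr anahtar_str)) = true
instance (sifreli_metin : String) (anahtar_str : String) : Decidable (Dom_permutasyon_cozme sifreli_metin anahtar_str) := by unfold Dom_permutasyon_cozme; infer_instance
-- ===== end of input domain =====

-- B replaces A's inverse-permutation table and per-block gather loop with one stable sort of
-- all ciphertext indices by their plaintext destination position (objective: alternative).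


-- ===== PORT A =====
-- turk_alfabe constant of the Python module
def turkAlfabe : List Char := "abcçdefgğhıijklmnoöprsştuüvyz".toList

def permutasyon_cozme (sifreli_metin : String) (anahtar_str : String) : String :=
  match (PySem.Str.split₀ (PySem.Str.strip anahtar_str)).mapM PySem.Int.ofStr? with
  | none => ""  -- raise ValueError("Anahtar yalnızca sayılardan oluşmalıdır. …")  (excluded by Pre_)
  | some anahtar =>
    let blok_boyu : Nat := anahtar.length
    if anahtar.any (fun i => decide (i < 1) || decide ((blok_boyu : Int) < i)) then
      ""  -- raise ValueError("Anahtar değerleri 1 ile {blok_boyu} arasında olmalıdır.")  (excluded by Pre_)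
    else
      let anahtar_idx : List Int := anahtar.map (fun k => k - 1)
      let inv_perm : List Int :=
        (PySem.List.enumerate anahtar_idx).foldl
          (fun acc p => PySem.List.pySetD acc p.2 p.1) (List.replicate blok_boyu 0)
      let metin := PySem.Str.lower sifreli_metin
      let temiz : List Char := metin.toList.filter
        (fun ch => (PySem.Set.ofList turkAlfabe).contains ch || ch == 'x')
      -- range(0, len(temiz), blok_boyu): with blok_boyu = 0 Python raises ValueError (excluded by Pre_)
      let cozulmus : List Char :=
        (PySem.List.pyRange 0 (temiz.length : Int) (blok_boyu : Int)).foldl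
          (fun acc i =>
            let blok0 := PySem.List.slice temiz (some i) (some (i + (blok_boyu : Int)))
            let blok := if blok0.length < blok_boyu
              then blok0 ++ List.replicate (blok_boyu - blok0.length) 'x' else blok0
            let orig :=
              (PySem.List.pyRange 0 (blok_boyu : Int) 1).foldl
                (fun o pos => PySem.List.pySetD o pos
                  (PySem.List.pyGetD blok (PySem.List.pyGetD inv_perm pos 0) ' '))
                (List.replicate blok_boyu ' ')
            acc ++ orig) []
      String.ofList cozulmus

-- ===== PORT B =====
def permutasyon_cozme_alt (sifreli_metin : String) (anahtar_str : String) : String :=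
  match (PySem.Str.split₀ (PySem.Str.strip anahtar_str)).mapM PySem.Int.ofStr? with
  | none => ""  -- raise ValueError (excluded by Pre_)
  | some anahtar =>
    let blok_boyu : Nat := anahtar.length
    if anahtar.any (fun i => decide (i < 1) || decide ((blok_boyu : Int) < i)) then
      ""  -- raise ValueError (excluded by Pre_)
    else
      let temiz0 : List Char := (PySem.Str.lower sifreli_metin).toList.filter
        (fun ch => (PySem.Set.ofList turkAlfabe).contains ch || ch == 'x')
      -- pad once to a multiple of the block size (len % 0 would raise in Python: excluded by Pre_)
      let temiz : List Char :=
        if temiz0 ≠ [] ∧ temiz0.length % blok_boyu ≠ 0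
        then temiz0 ++ List.replicate (blok_boyu - temiz0.length % blok_boyu) 'x'
        else temiz0
      -- hedef(i): plaintext destination of ciphertext slot i ('//' and '%' are Python's)
      let hedef : Int → Int := fun i =>
        PySem.Int.floordiv i (blok_boyu : Int) * (blok_boyu : Int)
          + PySem.List.pyGetD anahtar (PySem.Int.mod i (blok_boyu : Int)) 0 - 1
      let sira : List Int := PySem.List.sorted (PySem.List.pyRange 0 (temiz.length : Int) 1) hedef
      String.ofList (sira.map (fun i => PySem.List.pyGetD temiz i ' '))

-- ===== PRECONDITION & SPEC =====
-- Pre_ excludes inputs where A raises ValueError (a key token that is not an int, an empty key —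
-- range() with step 0 — or a key value out of the 1..len range), and keys with DUPLICATE values,
-- where A still returns a value but that value (slots of inv_perm left at their 0 initialisation)
-- is an accident of A's table construction while B's stable sort keeps tied slots in text order.
def Pre_permutasyon_cozme (sifreli_metin : String) (anahtar_str : String) : Prop :=
  PySem.Str.split₀ (PySem.Str.strip anahtar_str) ≠ [] ∧
  (∀ t ∈ PySem.Str.split₀ (PySem.Str.strip anahtar_str),
      (PySem.Int.ofStr? t).isSome = true ∧
      1 ≤ (PySem.Int.ofStr? t).getD 0 ∧
      (PySem.Int.ofStr? t).getD 0 ≤ ((PySem.Str.split₀ (PySem.Str.strip anahtar_str)).length : Int)) ∧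
  ((PySem.Str.split₀ (PySem.Str.strip anahtar_str)).map (fun t => (PySem.Int.ofStr? t).getD 0)).Nodup

instance (sifreli_metin : String) (anahtar_str : String) : Decidable (Pre_permutasyon_cozme sifreli_metin anahtar_str) := by
  unfold Pre_permutasyon_cozme; infer_instance

def pvWitness_permutasyon_cozme : String × String := ("ba", "2 1")

def Spec_permutasyon_cozme (sifreli_metin : String) (anahtar_str : String) (out : String) : Prop := out = permutasyon_cozme_alt sifreli_metin anahtar_str
instance (sifreli_metin : String) (anahtar_str : String) (out : String) : Decidable (Spec_permutasyon_cozme sifreli_metin anahtar_str out) := by unfold Spec_permutasyon_cozme; infer_instance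

-- ===== CLAIM (what is proved, stated in full; the proofs are below) =====
def Claim_equal_permutasyon_cozme : Prop := ∀ (sifreli_metin : String) (anahtar_str : String), Dom_permutasyon_cozme sifreli_metin anahtar_str → Pre_permutasyon_cozme sifreli_metin anahtar_str → Spec_permutasyon_cozme sifreli_metin anahtar_str (permutasyon_cozme sifreli_metin anahtar_str)

-- ===== LEMMAS AND PROOFS =====

-- a parse loop over tokens that all parse returns exactly the mapped values
theorem mapM_ofStr?_eq (toks : List String)
    (h : ∀ t ∈ toks, (PySem.Int.ofStr? t).isSome = true) :
    toks.mapM PySem.Int.ofStr? = some (toks.map (fun t => (PySem.Int.ofStr? t).getD 0)) := by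
  induction toks with
  | nil => rfl
  | cons t ts ih =>
    obtain ⟨v, hv⟩ := Option.isSome_iff_exists.mp (h t List.mem_cons_self)
    simp [hv, ih (fun x hx => h x (List.mem_cons_of_mem _ hx))]

theorem scatter_get_not_mem {α : Type} (l : List (Int × α)) (init : List α) (p : Nat)
    (hnn : ∀ q ∈ l, 0 ≤ q.1) (h : ∀ q ∈ l, q.1 ≠ (p : Int)) :
    (l.foldl (fun o q => PySem.List.pySetD o q.1 q.2) init)[p]? = init[p]? := by
  induction l generalizing init with
  | nil => rfl
  | cons q l ih =>
    have h0 : 0 ≤ q.1 := hnn q List.mem_cons_self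
    have hq : q.1 ≠ (p : Int) := h q List.mem_cons_self
    rw [List.foldl_cons,
      ih _ (fun r hr => hnn r (List.mem_cons_of_mem _ hr)) (fun r hr => h r (List.mem_cons_of_mem _ hr)),
      PySem.List.pySetD_of_nonneg _ _ h0]
    exact List.getElem?_set_ne (by omega)

theorem scatter_length {α : Type} (l : List (Int × α)) (init : List α) :
    (l.foldl (fun o q => PySem.List.pySetD o q.1 q.2) init).length = init.length := by
  induction l generalizing init with
  | nil => rfl
  | cons q l ih => simp [ih, PySem.List.length_pySetD]

theorem scatter_get_mem {α : Type} (l : List (Int × α)) (init : List α) (j : Int) (v : α)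
    (hnd : (l.map Prod.fst).Nodup) (hnn : ∀ q ∈ l, 0 ≤ q.1)
    (hmem : (j, v) ∈ l) (hlt : j.toNat < init.length) :
    (l.foldl (fun o q => PySem.List.pySetD o q.1 q.2) init)[j.toNat]? = some v := by
  induction l generalizing init with
  | nil => cases hmem
  | cons q l ih =>
    rw [List.map_cons] at hnd
    have hcons := List.nodup_cons.mp hnd
    rw [List.foldl_cons]
    rcases List.mem_cons.mp hmem with heq | htail
    · subst heq
      have h0 : (0:Int) ≤ j := hnn (j, v) List.mem_cons_self
      have hjcast : ((j.toNat : Nat) : Int) = j := Int.toNat_of_nonneg h0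
      rw [scatter_get_not_mem l _ j.toNat
            (fun r hr => hnn r (List.mem_cons_of_mem _ hr))
            (fun r hr hcontra => by
              have hm : r.1 ∈ l.map Prod.fst := List.mem_map_of_mem hr
              rw [hcontra, hjcast] at hm
              exact hcons.1 hm),
          PySem.List.pySetD_of_nonneg _ _ h0]
      exact List.getElem?_set_self hlt
    · exact ih _ hcons.2 (fun r hr => hnn r (List.mem_cons_of_mem _ hr)) htail
        (by rw [PySem.List.length_pySetD]; exact hlt)

theorem mem_of_nodup_bounded (l : List Int) (n : Nat) (hlen : l.length = n) (hnd : l.Nodup)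
    (hb : ∀ x ∈ l, 0 ≤ x ∧ x < (n : Int)) (p : Nat) (hp : p < n) : (p : Int) ∈ l := by
  have hsub : l.toFinset ⊆ Finset.Ico (0:Int) (n:Int) := by
    intro x hx
    have := hb x (List.mem_toFinset.mp hx)
    simp only [Finset.mem_Ico]
    exact this
  have hcard : (Finset.Ico (0:Int) (n:Int)).card ≤ l.toFinset.card := by
    rw [List.toFinset_card_of_nodup hnd, hlen, Int.card_Ico]
    simp
  have heq := Finset.eq_of_subset_of_card_le hsub hcard
  have hpmem : (p:Int) ∈ Finset.Ico (0:Int) (n:Int) := by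
    simp only [Finset.mem_Ico]
    constructor
    · exact_mod_cast Nat.zero_le p
    · exact_mod_cast hp
  rw [← heq] at hpmem
  exact List.mem_toFinset.mp hpmem

theorem range_step_pad (n L pad : Nat) (hn : 0 < n)
    (hpad : pad = if L ≠ 0 ∧ L % n ≠ 0 then n - L % n else 0) :
    PySem.List.pyRange 0 (L:Int) (n:Int) = PySem.List.pyRange 0 ((L + pad : Nat):Int) (n:Int) := by
  by_cases hL : L = 0
  · subst hL; simp at hpad; simp [hpad]
  by_cases hr : L % n = 0
  · simp [hpad, hL, hr]
  have hn' : (0:Int) < (n:Int) := by exact_mod_cast hn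
  rw [PySem.List.pyRange_of_pos _ _ hn', PySem.List.pyRange_of_pos _ _ hn']
  have hLpos : (0:Int) < (L:Int) := by exact_mod_cast Nat.pos_of_ne_zero hL
  have hLPpos : (0:Int) < ((L + pad : Nat):Int) := by exact_mod_cast Nat.lt_of_lt_of_le (Nat.pos_of_ne_zero hL) (Nat.le_add_right _ _)
  rw [if_pos hLpos, if_pos hLPpos]
  have hrlt : L % n < n := Nat.mod_lt _ hn
  have hr1 : 1 ≤ L % n := Nat.one_le_iff_ne_zero.mpr hr
  have hdm : n * (L / n) + L % n = L := Nat.div_add_mod L n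
  have hpad' : pad = n - L % n := by simp [hpad, hL, hr]
  have hnz : ((n:Int)) ≠ 0 := by exact_mod_cast hn.ne'
  have hc1 : ((L:Int) - 0 + n - 1) / n = ((L / n : Nat) : Int) + 1 := by
    have hdmz : (L:Int) = (n:Int) * ((L / n : Nat):Int) + ((L % n : Nat):Int) := by exact_mod_cast hdm.symm
    have hrw : ((L:Int) - 0 + n - 1) = (((L % n : Nat):Int) - 1) + (((L / n : Nat):Int) + 1) * (n:Int) := by
      rw [hdmz]; ring
    rw [hrw, Int.add_mul_ediv_right _ _ hnz,
      Int.ediv_eq_zero_of_lt (by push_cast; omega) (by push_cast; omega)]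
    ring
  have hc2 : (((L + pad : Nat):Int) - 0 + n - 1) / n = ((L / n : Nat) : Int) + 1 := by
    have hdmz : ((L + pad : Nat):Int) = (n:Int) * (((L / n : Nat):Int) + 1) := by
      have h1 : ((L + pad : Nat):Int) = (L:Int) + (pad:Int) := by push_cast; ring
      have h2 : (pad:Int) = (n:Int) - ((L % n : Nat):Int) := by rw [hpad', Nat.cast_sub hrlt.le]
      have hdmz0 : (L:Int) = (n:Int) * ((L / n : Nat):Int) + ((L % n : Nat):Int) := by
        exact_mod_cast hdm.symm
      rw [h1, h2, hdmz0]; ring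
    have hrw : (((L + pad : Nat):Int) - 0 + n - 1) = ((n:Int) - 1) + (((L / n : Nat):Int) + 1) * (n:Int) := by
      rw [hdmz]; ring
    rw [hrw, Int.add_mul_ediv_right _ _ hnz,
      Int.ediv_eq_zero_of_lt (by omega) (by omega)]
    ring
  rw [hc1, hc2]

theorem dvd_L_add_pad (n L pad : Nat) (hn : 0 < n)
    (hpad : pad = if L ≠ 0 ∧ L % n ≠ 0 then n - L % n else 0) : n ∣ L + pad := by
  have hdm := Nat.div_add_mod L n
  by_cases h1 : L = 0
  · subst h1; simp at hpad; simp [hpad]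
  by_cases h2 : L % n = 0
  · have hp0 : pad = 0 := by simp [hpad, h2]
    exact ⟨L / n, by omega⟩
  · have hpv : pad = n - L % n := by simp [hpad, h1, h2]
    refine ⟨L / n + 1, ?_⟩
    rw [Nat.mul_add, Nat.mul_one]
    have hrlt : L % n < n := Nat.mod_lt _ hn
    omega

-- A's inner write loop over range(n) into a fresh length-n list IS the map of its value function
theorem setfold_range_eq_map {α : Type} (n : Nat) (f : Int → α) (c : α) :
    (PySem.List.pyRange 0 (n:Int) 1).foldl
      (fun o pos => PySem.List.pySetD o pos (f pos)) (List.replicate n c)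
    = (PySem.List.pyRange 0 (n:Int) 1).map f := by
  have hF : (PySem.List.pyRange 0 (n:Int) 1).foldl
      (fun o pos => PySem.List.pySetD o pos (f pos)) (List.replicate n c)
      = ((PySem.List.pyRange 0 (n:Int) 1).map (fun pos => (pos, f pos))).foldl
        (fun o q => PySem.List.pySetD o q.1 q.2) (List.replicate n c) := by
    rw [List.foldl_map]
  rw [hF]
  apply List.ext_getElem?
  intro p
  by_cases hp : p < n
  · have hpm : (p:Int) ∈ PySem.List.pyRange 0 (n:Int) 1 := by
      rw [PySem.List.mem_pyRange_one]
      exact ⟨by exact_mod_cast Nat.zero_le p, by exact_mod_cast hp⟩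
    have hL := scatter_get_mem ((PySem.List.pyRange 0 (n:Int) 1).map (fun pos => (pos, f pos)))
      (List.replicate n c) (p:Int) (f (p:Int))
      (by rw [List.map_map]
          have : ((fun q : Int × α => q.1) ∘ fun pos : Int => (pos, f pos)) = id := rfl
          rw [this, List.map_id]
          exact PySem.List.nodup_pyRange_one 0 n)
      (by intro r hr
          obtain ⟨q, hq, rfl⟩ := List.mem_map.mp hr
          exact (PySem.List.mem_pyRange_one.mp hq).1)
      (List.mem_map_of_mem hpm) (by simp [hp])
    simp only [Int.toNat_natCast] at hL
    rw [hL, List.getElem?_map, PySem.List.getElem?_pyRange_one]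
    simp [hp]
  · rw [List.getElem?_eq_none, List.getElem?_eq_none]
    · rw [List.length_map, PySem.List.pyRange_of_pos _ _ (by omega : (0:Int) < 1)]
      simp only [List.length_map, List.length_range]
      split_ifs with h
      · omega
      · omega
    · rw [scatter_length, List.length_replicate]; omega

-- the inverse-table fold: at each p < n it holds the (unique) k with idx[k] = p
theorem inv_get (idx : List Int) (n : Nat) (hlen : idx.length = n) (hnd : idx.Nodup)
    (hb : ∀ x ∈ idx, 0 ≤ x ∧ x < (n : Int)) (p : Nat) (hp : p < n) :
    ∃ k : Nat, k < n ∧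
      ((PySem.List.enumerate idx).foldl
        (fun acc q => PySem.List.pySetD acc q.2 q.1) (List.replicate n 0))[p]? = some (k:Int) ∧
      idx[k]? = some (p:Int) := by
  have hmemp : (p:Int) ∈ idx := mem_of_nodup_bounded idx n hlen hnd hb p hp
  obtain ⟨k, hk, hidxk⟩ := List.mem_iff_getElem.mp hmemp
  refine ⟨k, hlen ▸ hk, ?_, by rw [List.getElem?_eq_getElem hk, hidxk]⟩
  have henum : ((k:Int), (p:Int)) ∈ PySem.List.enumerate idx := by
    rw [PySem.List.mem_enumerate_iff]
    exact ⟨k, hk, by rw [hidxk]; norm_num⟩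
  have hsnd : ∀ q ∈ PySem.List.enumerate idx (0:Int), 0 ≤ q.2 := by
    intro q hq
    have hqm : q.2 ∈ idx := by
      rw [← PySem.List.map_snd_enumerate idx 0]
      exact List.mem_map_of_mem hq
    exact (hb _ hqm).1
  have hI : ((PySem.List.enumerate idx).foldl
      (fun acc q => PySem.List.pySetD acc q.2 q.1) (List.replicate n 0))
      = (((PySem.List.enumerate idx).map (fun q => (q.2, q.1))).foldl
        (fun o q => PySem.List.pySetD o q.1 q.2) (List.replicate n (0:Int))) := by
    rw [List.foldl_map]
  rw [hI]
  have := scatter_get_mem ((PySem.List.enumerate idx).map (fun q => (q.2, q.1)))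
    (List.replicate n (0:Int)) (p:Int) (k:Int)
    (by rw [List.map_map]
        have : ((fun q : Int × Int => q.1) ∘ fun q : Int × Int => (q.2, q.1))
            = (fun q : Int × Int => q.2) := rfl
        rw [this, PySem.List.map_snd_enumerate idx 0]
        exact hnd)
    (by intro r hr
        obtain ⟨q, hq, rfl⟩ := List.mem_map.mp hr
        exact hsnd q hq)
    (List.mem_map_of_mem henum) (by simp [hp])
  simpa using this


-- destination key evaluated on a block element: hedef(base + invL[p]) = base + p
theorem hedef_eval (anahtar : List Int) (n : Nat) (hlen : anahtar.length = n) (hn : 0 < n)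
    (hb : ∀ i ∈ anahtar, 1 ≤ i ∧ i ≤ (n : Int)) (hnd : anahtar.Nodup)
    (base : Int) (hd : (n:Int) ∣ base) (p : Nat) (hp : p < n) :
    (PySem.Int.floordiv (base + PySem.List.pyGetD
        ((PySem.List.enumerate (anahtar.map (fun k => k - 1))).foldl
          (fun acc q => PySem.List.pySetD acc q.2 q.1) (List.replicate n 0)) (p:Int) 0) (n:Int) * (n:Int)
      + PySem.List.pyGetD anahtar (PySem.Int.mod (base + PySem.List.pyGetD
        ((PySem.List.enumerate (anahtar.map (fun k => k - 1))).foldl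
          (fun acc q => PySem.List.pySetD acc q.2 q.1) (List.replicate n 0)) (p:Int) 0) (n:Int)) 0 - 1)
    = base + p := by
  have hidxlen : (anahtar.map (fun k => k - 1)).length = n := by rw [List.length_map, hlen]
  have hidxnd : (anahtar.map (fun k => k - 1)).Nodup :=
    hnd.map (fun x y h => by omega)
  have hidxb : ∀ x ∈ anahtar.map (fun k => k - 1), 0 ≤ x ∧ x < (n : Int) := by
    intro x hx
    obtain ⟨i, hi, rfl⟩ := List.mem_map.mp hx
    have := hb i hi
    omega
  obtain ⟨k, hk, hget, hidxk⟩ := inv_get (anahtar.map (fun k => k - 1)) n hidxlen hidxnd hidxb p hp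
  have hgd : PySem.List.pyGetD
      ((PySem.List.enumerate (anahtar.map (fun k => k - 1))).foldl
        (fun acc q => PySem.List.pySetD acc q.2 q.1) (List.replicate n 0)) (p:Int) 0 = (k:Int) := by
    rw [PySem.List.pyGetD_natCast, List.getD_eq_getElem?_getD, hget]
    rfl
  rw [hgd]
  obtain ⟨q, hq⟩ := hd
  have hn' : (0:Int) < (n:Int) := by exact_mod_cast hn
  have hkn : (k:Int) < (n:Int) := by exact_mod_cast hk
  have hfd : PySem.Int.floordiv (base + (k:Int)) (n:Int) = q := by
    rw [PySem.Int.floordiv_eq_iff_of_pos hn']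
    constructor
    · rw [hq]; nlinarith [Int.natCast_nonneg k]
    · rw [hq]; nlinarith
  have hmd : PySem.Int.mod (base + (k:Int)) (n:Int) = (k:Int) := by
    have := PySem.Int.floordiv_mul_add_mod (base + (k:Int)) (n:Int)
    rw [hfd] at this
    have hqn : q * (n:Int) = base := by rw [hq]; ring
    omega
  rw [hfd, hmd]
  have hkl : k < anahtar.length := by omega
  have hak : PySem.List.pyGetD anahtar (k:Int) 0 = anahtar[k] := by
    rw [PySem.List.pyGetD_natCast, List.getD_eq_getElem?_getD, List.getElem?_eq_getElem hkl]
    rfl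
  have hval : anahtar[k] - 1 = (p:Int) := by
    have : (anahtar.map (fun k => k - 1))[k]? = some (anahtar[k] - 1) := by
      rw [List.getElem?_map, List.getElem?_eq_getElem hkl]
      rfl
    rw [this] at hidxk
    exact Option.some_injective _ hidxk
  rw [hak]
  have hqn : q * (n:Int) = base := by rw [hq]; ring
  omega

-- the sorted order of all indices by destination IS the per-block inverse-table traversal
theorem sorted_hedef_eq (anahtar : List Int) (n : Nat) (hlen : anahtar.length = n) (hn : 0 < n)
    (hb : ∀ i ∈ anahtar, 1 ≤ i ∧ i ≤ (n : Int)) (hnd : anahtar.Nodup) (P : Nat) (hdvd : n ∣ P) :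
    PySem.List.sorted (PySem.List.pyRange 0 (P:Int) 1)
      (fun i => PySem.Int.floordiv i (n:Int) * (n:Int)
        + PySem.List.pyGetD anahtar (PySem.Int.mod i (n:Int)) 0 - 1)
    = (PySem.List.pyRange 0 (P:Int) (n:Int)).flatMap
        (fun base => (PySem.List.pyRange 0 (n:Int) 1).map
          (fun pos => base + PySem.List.pyGetD
            ((PySem.List.enumerate (anahtar.map (fun k => k - 1))).foldl
              (fun acc q => PySem.List.pySetD acc q.2 q.1) (List.replicate n 0)) pos 0)) := by
  have hn' : (0:Int) < (n:Int) := by exact_mod_cast hn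
  have hidxlen : (anahtar.map (fun k => k - 1)).length = n := by rw [List.length_map, hlen]
  have hidxnd : (anahtar.map (fun k => k - 1)).Nodup := hnd.map (fun x y h => by omega)
  have hidxb : ∀ x ∈ anahtar.map (fun k => k - 1), 0 ≤ x ∧ x < (n : Int) := by
    intro x hx
    obtain ⟨i, hi, rfl⟩ := List.mem_map.mp hx
    have := hb i hi
    omega
  have hinvget : ∀ p : Nat, p < n → ∃ k : Nat, k < n ∧
      PySem.List.pyGetD
        ((PySem.List.enumerate (anahtar.map (fun k => k - 1))).foldl
          (fun acc q => PySem.List.pySetD acc q.2 q.1) (List.replicate n 0)) (p:Int) 0 = (k:Int) ∧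
      (anahtar.map (fun k => k - 1))[k]? = some (p:Int) := by
    intro p hp
    obtain ⟨k, hk, hget, hik⟩ := inv_get (anahtar.map (fun k => k - 1)) n hidxlen hidxnd hidxb p hp
    exact ⟨k, hk, by rw [PySem.List.pyGetD_natCast, List.getD_eq_getElem?_getD, hget]; rfl, hik⟩
  have hroundtrip : ∀ r : Nat, r < n → ∃ p : Nat, p < n ∧
      (anahtar.map (fun k => k - 1))[r]? = some (p:Int) ∧
      PySem.List.pyGetD
        ((PySem.List.enumerate (anahtar.map (fun k => k - 1))).foldl
          (fun acc q => PySem.List.pySetD acc q.2 q.1) (List.replicate n 0)) (p:Int) 0 = (r:Int) := by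
    intro r hr
    have hrl : r < (anahtar.map (fun k => k - 1)).length := by omega
    have hvb := hidxb _ (List.getElem_mem hrl)
    set v := (anahtar.map (fun k => k - 1))[r] with hv
    refine ⟨v.toNat, by omega, ?_, ?_⟩
    · rw [List.getElem?_eq_getElem hrl, ← hv, Int.toNat_of_nonneg hvb.1]
    · obtain ⟨k, hk, hget, hik⟩ := hinvget v.toNat (by omega)
      have hkl : k < (anahtar.map (fun k => k - 1)).length := by omega
      rw [List.getElem?_eq_getElem hkl] at hik
      have hkr : k = r := by
        apply (List.Nodup.getElem_inj_iff hidxnd).mp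
        rw [Option.some_injective _ hik, Int.toNat_of_nonneg hvb.1, hv]
      rw [hget, hkr]
  -- the target traversal, its pairwise-increasing keys and its permutation property
  have hpw : ((PySem.List.pyRange 0 (P:Int) (n:Int)).flatMap
        (fun base => (PySem.List.pyRange 0 (n:Int) 1).map
          (fun pos => base + PySem.List.pyGetD
            ((PySem.List.enumerate (anahtar.map (fun k => k - 1))).foldl
              (fun acc q => PySem.List.pySetD acc q.2 q.1) (List.replicate n 0)) pos 0))).Pairwise
      (fun a b => (PySem.Int.floordiv a (n:Int) * (n:Int)
          + PySem.List.pyGetD anahtar (PySem.Int.mod a (n:Int)) 0 - 1)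
        < (PySem.Int.floordiv b (n:Int) * (n:Int)
          + PySem.List.pyGetD anahtar (PySem.Int.mod b (n:Int)) 0 - 1)) := by
    rw [List.flatMap_def, List.pairwise_flatten]
    constructor
    · intro l hl
      obtain ⟨base, hbase, rfl⟩ := List.mem_map.mp hl
      obtain ⟨hb0, hbP, hbd0⟩ := (PySem.List.mem_pyRange_iff_of_pos hn' base).mp hbase
      have hbd : (n:Int) ∣ base := by simpa using hbd0
      rw [List.pairwise_map]
      refine (PySem.List.pairwise_lt_pyRange_one 0 n).imp_of_mem ?_
      intro p1 p2 h1 h2 hlt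
      obtain ⟨h10, h1n⟩ := PySem.List.mem_pyRange_one.mp h1
      obtain ⟨h20, h2n⟩ := PySem.List.mem_pyRange_one.mp h2
      have hc1 : ((p1.toNat : Nat) : Int) = p1 := Int.toNat_of_nonneg h10
      have hc2 : ((p2.toNat : Nat) : Int) = p2 := Int.toNat_of_nonneg h20
      have e1 := hedef_eval anahtar n hlen hn hb hnd base hbd p1.toNat (by omega)
      have e2 := hedef_eval anahtar n hlen hn hb hnd base hbd p2.toNat (by omega)
      rw [hc1] at e1
      rw [hc2] at e2
      rw [e1, e2]
      omega
    · rw [List.pairwise_map]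
      have hbpw : (PySem.List.pyRange 0 (P:Int) (n:Int)).Pairwise
          (fun b1 b2 => b1 + (n:Int) ≤ b2) := by
        rw [PySem.List.pyRange_of_pos _ _ hn', List.pairwise_map]
        refine (List.pairwise_lt_range).imp ?_
        intro k1 k2 hk
        have : (n:Int) * (k1:Int) + (n:Int) ≤ (n:Int) * (k2:Int) := by
          have hk' : (k1:Int) + 1 ≤ (k2:Int) := by exact_mod_cast hk
          nlinarith
        omega
      refine hbpw.imp_of_mem ?_
      intro b1 b2 hm1 hm2 hle x hx y hy
      obtain ⟨p1, hp1, rfl⟩ := List.mem_map.mp hx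
      obtain ⟨p2, hp2, rfl⟩ := List.mem_map.mp hy
      obtain ⟨hb10, hb1P, hb1d0⟩ := (PySem.List.mem_pyRange_iff_of_pos hn' b1).mp hm1
      obtain ⟨hb20, hb2P, hb2d0⟩ := (PySem.List.mem_pyRange_iff_of_pos hn' b2).mp hm2
      obtain ⟨h10, h1n⟩ := PySem.List.mem_pyRange_one.mp hp1
      obtain ⟨h20, h2n⟩ := PySem.List.mem_pyRange_one.mp hp2
      have hc1 : ((p1.toNat : Nat) : Int) = p1 := Int.toNat_of_nonneg h10
      have hc2 : ((p2.toNat : Nat) : Int) = p2 := Int.toNat_of_nonneg h20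
      have e1 := hedef_eval anahtar n hlen hn hb hnd b1 (by simpa using hb1d0) p1.toNat (by omega)
      have e2 := hedef_eval anahtar n hlen hn hb hnd b2 (by simpa using hb2d0) p2.toNat (by omega)
      rw [hc1] at e1
      rw [hc2] at e2
      rw [e1, e2]
      omega
  refine PySem.List.sorted_eq_of_perm_of_pairwise_lt _ _ _ ?_ hpw
  have hnodupT : ((PySem.List.pyRange 0 (P:Int) (n:Int)).flatMap
        (fun base => (PySem.List.pyRange 0 (n:Int) 1).map
          (fun pos => base + PySem.List.pyGetD
            ((PySem.List.enumerate (anahtar.map (fun k => k - 1))).foldl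
              (fun acc q => PySem.List.pySetD acc q.2 q.1) (List.replicate n 0)) pos 0))).Nodup :=
    hpw.imp (fun h he => absurd h (by rw [he]; exact lt_irrefl _))
  refine (List.perm_ext_iff_of_nodup hnodupT (PySem.List.nodup_pyRange_one 0 (P:Int))).mpr ?_
  intro j
  constructor
  · intro hj
    obtain ⟨base, hbase, hj2⟩ := List.mem_flatMap.mp hj
    obtain ⟨pos, hpos, rfl⟩ := List.mem_map.mp hj2
    obtain ⟨hb0, hbP, hbd0⟩ := (PySem.List.mem_pyRange_iff_of_pos hn' base).mp hbase
    obtain ⟨hp0, hpn⟩ := PySem.List.mem_pyRange_one.mp hpos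
    have hc : ((pos.toNat : Nat) : Int) = pos := Int.toNat_of_nonneg hp0
    obtain ⟨k, hk, hget, _⟩ := hinvget pos.toNat (by omega)
    rw [← hc, hget]
    have hPd : (n:Int) ∣ (P:Int) := Int.natCast_dvd_natCast.mpr hdvd
    have hbd : (n:Int) ∣ base := by simpa using hbd0
    have hstep : base + (n:Int) ≤ (P:Int) := by
      have hsub : (n:Int) ∣ (P:Int) - base := (Int.dvd_sub hPd hbd)
      have := Int.le_of_dvd (by omega) hsub
      omega
    rw [PySem.List.mem_pyRange_one]
    omega
  · intro hj
    obtain ⟨hj0, hjP⟩ := PySem.List.mem_pyRange_one.mp hj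
    have hjc : ((j.toNat : Nat) : Int) = j := Int.toNat_of_nonneg hj0
    obtain ⟨p, hp, hik, hget⟩ := hroundtrip (j.toNat % n) (Nat.mod_lt _ hn)
    refine List.mem_flatMap.mpr ⟨((j.toNat / n * n : Nat) : Int), ?_,
      List.mem_map.mpr ⟨(p:Int), ?_, ?_⟩⟩
    · rw [PySem.List.mem_pyRange_iff_of_pos hn']
      refine ⟨by exact_mod_cast Nat.zero_le _, ?_, ?_⟩
      · have h1 : j.toNat / n * n ≤ j.toNat := Nat.div_mul_le_self _ _
        have h2 : (j.toNat : Int) < (P:Int) := by omega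
        have : ((j.toNat / n * n : Nat) : Int) ≤ (j.toNat : Int) := by exact_mod_cast h1
        omega
      · have : (n:Int) ∣ ((j.toNat / n * n : Nat) : Int) :=
          Int.natCast_dvd_natCast.mpr ⟨j.toNat / n, Nat.mul_comm _ _⟩
        simp only [Int.sub_zero]; exact this
    · rw [PySem.List.mem_pyRange_one]
      exact ⟨by exact_mod_cast Nat.zero_le p, by exact_mod_cast hp⟩
    · rw [hget]
      have hdm : j.toNat / n * n + j.toNat % n = j.toNat := by
        rw [Nat.mul_comm]; exact Nat.div_add_mod j.toNat n
      rw [← hjc]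
      exact_mod_cast hdm

-- ===== VERDICT (by name: the statement is the Claim_ definition above) =====
set_option maxHeartbeats 1600000 in
theorem permutasyon_cozme_spec : Claim_equal_permutasyon_cozme := by
  intro s k hdom hpre
  obtain ⟨hne, hall, hndup⟩ := hpre
  unfold Spec_permutasyon_cozme permutasyon_cozme permutasyon_cozme_alt
  have hparse : (PySem.Str.split₀ (PySem.Str.strip k)).mapM PySem.Int.ofStr?
      = some ((PySem.Str.split₀ (PySem.Str.strip k)).map (fun t => (PySem.Int.ofStr? t).getD 0)) :=
    mapM_ofStr?_eq _ (fun t ht => (hall t ht).1)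
  rw [hparse]
  set a : List Int := (PySem.Str.split₀ (PySem.Str.strip k)).map (fun t => (PySem.Int.ofStr? t).getD 0) with ha
  have hbound : ∀ i ∈ a, 1 ≤ i ∧ i ≤ (a.length : Int) := by
    intro i hi
    rw [ha] at hi
    obtain ⟨t, ht, rfl⟩ := List.mem_map.mp hi
    refine ⟨(hall t ht).2.1, ?_⟩
    have h2 := (hall t ht).2.2
    rw [ha, List.length_map]
    exact h2
  have hn : 0 < a.length := by
    rw [ha, List.length_map]
    exact List.length_pos_of_ne_nil hne
  clear_value a
  dsimp only
  have hany : (a.any fun i => decide (i < 1) || decide ((a.length : Int) < i)) = false := by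
    rw [List.any_eq_false]
    intro i hi
    have hb := hbound i hi
    simp only [Bool.or_eq_true, decide_eq_true_eq, not_or]
    omega
  simp only [hany, Bool.false_eq_true, if_false]
  set n := a.length with hndef
  have hlen : a.length = n := hndef.symm
  have hbound' : ∀ i ∈ a, 1 ≤ i ∧ i ≤ (n : Int) := hbound
  set t0 : List Char := (PySem.Str.lower s).toList.filter
      (fun ch => (PySem.Set.ofList turkAlfabe).contains ch || ch == 'x') with ht0
  set L := t0.length with hLdef
  set pad : Nat := if t0 ≠ [] ∧ L % n ≠ 0 then n - L % n else 0 with hpaddef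
  clear_value t0 pad
  have hpad' : pad = if L ≠ 0 ∧ L % n ≠ 0 then n - L % n else 0 := by
    rw [hpaddef]
    by_cases h0 : t0 = []
    · have : L = 0 := by rw [hLdef, h0]; rfl
      simp [h0, this]
    · have : L ≠ 0 := by
        rw [hLdef]
        simpa [List.length_eq_zero_iff] using h0
      simp [h0, this]
  have htemiz : (if t0 ≠ [] ∧ L % n ≠ 0 then t0 ++ List.replicate (n - L % n) 'x' else t0)
      = t0 ++ List.replicate pad 'x' := by
    by_cases hc : t0 ≠ [] ∧ L % n ≠ 0
    · rw [if_pos hc, hpaddef, if_pos hc]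
    · rw [if_neg hc, hpaddef, if_neg hc]; simp
  rw [htemiz]
  have hLp : (t0 ++ List.replicate pad 'x').length = L + pad := by
    rw [List.length_append, List.length_replicate, hLdef]
  rw [show ((t0 ++ List.replicate pad 'x').length : Int) = ((L + pad : Nat) : Int) from by rw [hLp]]
  have hdvdLp : n ∣ L + pad := dvd_L_add_pad n L pad hn hpad'
  rw [sorted_hedef_eq a n hlen hn hbound' hndup (L + pad) hdvdLp]
  refine congrArg String.ofList ?_
  rw [PySem.List.foldl_append_eq_flatMap, List.nil_append,
    range_step_pad n L pad hn hpad', List.map_flatMap]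
  apply List.flatMap_congr
  intro i hi
  have hn' : (0:Int) < (n:Int) := by exact_mod_cast hn
  obtain ⟨hi0, hiLP, hidvd0⟩ := (PySem.List.mem_pyRange_iff_of_pos hn' i).mp hi
  have hidvd : (n:Int) ∣ i := by simpa using hidvd0
  have hicast : i = (i.toNat : Int) := (Int.toNat_of_nonneg hi0).symm
  set iN := i.toNat with hiNdef
  have hdvdN : n ∣ iN := by
    have hd : (n:Int) ∣ (iN:Int) := by rw [← hicast]; exact hidvd
    exact_mod_cast hd
  have hiNp : iN + n ≤ L + pad := by
    have hPd : (n:Int) ∣ ((L + pad : Nat):Int) := Int.natCast_dvd_natCast.mpr hdvdLp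
    have hsub : (n:Int) ∣ ((L + pad : Nat):Int) - i := Int.dvd_sub hPd hidvd
    have := Int.le_of_dvd (by omega) hsub
    omega
  have hpadlt : pad < n := by
    rw [hpad']
    split_ifs with h
    · have : L % n < n := Nat.mod_lt _ hn
      omega
    · omega
  have hiNL : iN < L := by omega
  rw [hicast]
  have hslice : PySem.List.slice t0 (some ((iN : Nat) : Int)) (some ((iN : Int) + (n : Int)))
      = (t0.drop iN).take n := by
    rw [PySem.List.slice_toNat t0 (a := ((iN : Nat) : Int)) (b := ((iN : Int) + (n : Int)))
      (Int.natCast_nonneg iN) (add_nonneg (Int.natCast_nonneg iN) (Int.natCast_nonneg n))]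
    simp only [Int.toNat_natCast]
    rw [show ((iN : Int) + (n : Int)).toNat = iN + n from by omega, Nat.add_sub_cancel_left]
  have hlen_take : ((t0.drop iN).take n).length = min n (L - iN) := by
    rw [List.length_take, List.length_drop, ← hLdef]
  have hblok : (if ((t0.drop iN).take n).length < n
        then ((t0.drop iN).take n) ++ List.replicate (n - ((t0.drop iN).take n).length) 'x'
        else ((t0.drop iN).take n))
      = ((t0 ++ List.replicate pad 'x').drop iN).take n := by
    by_cases hfull : iN + n ≤ L
    · have hnle : n ≤ (t0.drop iN).length := by rw [List.length_drop, ← hLdef]; omega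
      rw [if_neg (by rw [hlen_take]; omega),
        List.drop_append_of_le_length (by omega),
        List.take_append_of_le_length hnle]
    · rw [if_pos (by rw [hlen_take]; omega)]
      obtain ⟨t, htt⟩ := hdvdN
      have hmodL : L % n = L - iN := by
        have h1 : L = (L - iN) + n * t := by omega
        conv_lhs => rw [h1]
        rw [Nat.add_mul_mod_self_left]
        exact Nat.mod_eq_of_lt (by omega)
      have hpadv : pad = n - (L - iN) := by
        rw [hpad', if_pos ⟨by omega, by omega⟩, hmodL]
      rw [List.drop_append_of_le_length (by omega),
        List.take_of_length_le (show (t0.drop iN).length ≤ n from by rw [List.length_drop]; omega),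
        List.take_of_length_le
          (by rw [List.length_append, List.length_drop, List.length_replicate]; omega),
        List.length_drop, ← hLdef, hpadv]
  rw [hslice, hblok, setfold_range_eq_map, List.map_map]
  apply List.map_congr_left
  intro pos hpos
  obtain ⟨hp0, hpn⟩ := PySem.List.mem_pyRange_one.mp hpos
  have hpcast : ((pos.toNat : Nat) : Int) = pos := Int.toNat_of_nonneg hp0
  have hidxlen : (a.map (fun k => k - 1)).length = n := by rw [List.length_map, hlen]
  have hidxnd : (a.map (fun k => k - 1)).Nodup := hndup.map (fun x y h => by omega)
  have hidxb : ∀ x ∈ a.map (fun k => k - 1), 0 ≤ x ∧ x < (n : Int) := by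
    intro x hx
    obtain ⟨j, hj, rfl⟩ := List.mem_map.mp hx
    have := hbound' j hj
    omega
  obtain ⟨kk, hkk, hget, _⟩ := inv_get (a.map (fun k => k - 1)) n hidxlen hidxnd hidxb
    pos.toNat (by omega)
  have hgd : PySem.List.pyGetD
      ((PySem.List.enumerate (a.map (fun k => k - 1))).foldl
        (fun acc q => PySem.List.pySetD acc q.2 q.1) (List.replicate n 0)) pos 0 = (kk:Int) := by
    rw [← hpcast, PySem.List.pyGetD_natCast, List.getD_eq_getElem?_getD, hget]
    rfl
  rw [Function.comp_apply, hgd]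
  have hbk : iN + kk < (t0 ++ List.replicate pad 'x').length := by
    rw [hLp]; omega
  have h1 : PySem.List.pyGetD (((t0 ++ List.replicate pad 'x').drop iN).take n) (kk:Int) ' '
      = (t0 ++ List.replicate pad 'x')[iN + kk]'hbk := by
    rw [PySem.List.pyGetD_natCast, List.getD_eq_getElem?_getD, List.getElem?_take,
      if_pos hkk, List.getElem?_drop, List.getElem?_eq_getElem hbk]
    rfl
  have h2 : PySem.List.pyGetD (t0 ++ List.replicate pad 'x') ((iN:Int) + (kk:Int)) ' '
      = (t0 ++ List.replicate pad 'x')[iN + kk]'hbk := by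
    have hcast : ((iN : Int) + (kk : Int)) = ((iN + kk : Nat) : Int) := by push_cast; ring
    rw [hcast, PySem.List.pyGetD_natCast, List.getD_eq_getElem?_getD,
      List.getElem?_eq_getElem hbk]
    rfl
  rw [h1, h2]
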